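-- pv_equiv track=rewrite | github.com/OnlylLin/Typing-game | data.py | word_combo_score
-- ===== SOURCE A (Python) =====
-- def word_combo_score(target_words, typed_words):
--     """计算词语连击"""
--     max_combo = cur = 0
--     for tw, uw in zip(target_words, typed_words):
--         if tw == uw:
--             cur += 1
--             max_combo = max(max_combo, cur)
--         else:
--             cur = 0
--     return max_combo
-- ===== SOURCE B (Python) =====
-- from itertools import groupby
--
-- def word_combo_score(target_words, typed_words):
--     matches = [tw == uw for tw, uw in zip(target_words, typed_words)]
--     return max((sum(1 for _ in g) for k, g in groupby(matches) if k), default=0)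
-- ===== Notes on version B (the rewrite author's own statement) =====
-- stated objective: idiomatic
-- what changed: Replaces the running current/max counter state machine with a two-phase pass: build the boolean match list, group it into consecutive runs with itertools.groupby, and take the max length of the True runs (default 0).
import Mathlib
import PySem

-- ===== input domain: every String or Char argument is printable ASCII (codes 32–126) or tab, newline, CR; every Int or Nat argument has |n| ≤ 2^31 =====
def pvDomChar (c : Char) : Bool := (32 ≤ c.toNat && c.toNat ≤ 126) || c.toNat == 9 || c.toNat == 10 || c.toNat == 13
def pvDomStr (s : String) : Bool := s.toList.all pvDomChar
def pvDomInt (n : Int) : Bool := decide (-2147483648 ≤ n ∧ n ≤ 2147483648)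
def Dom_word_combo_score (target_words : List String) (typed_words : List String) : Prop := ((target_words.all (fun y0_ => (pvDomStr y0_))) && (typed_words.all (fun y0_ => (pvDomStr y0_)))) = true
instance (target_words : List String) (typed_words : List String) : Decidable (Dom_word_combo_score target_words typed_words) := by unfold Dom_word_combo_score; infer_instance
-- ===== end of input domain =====

-- B replaces A's running current/max counter state machine with a two-phase pass:
-- build the boolean match list, group it into consecutive runs, take the max True-run length (idiomatic).


-- ===== PORT A =====
-- literal transliteration: fold over zip with state (max_combo, cur)
def word_combo_score (target_words : List String) (typed_words : List String) : Int :=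
  (List.foldl
    (fun (st : Int × Int) (p : String × String) =>
      if p.1 == p.2 then (max st.1 (st.2 + 1), st.2 + 1) else (st.1, 0))
    (0, 0) (List.zip target_words typed_words)).1

-- ===== PORT B =====
-- groupby: current key b with count n, consuming the rest of the list
def pvGroupBy (b : Bool) (n : Int) : List Bool → List (Bool × Int)
  | [] => [(b, n)]
  | c :: t => if c == b then pvGroupBy b (n + 1) t else (b, n) :: pvGroupBy c 1 t

def pvRuns : List Bool → List (Bool × Int)
  | [] => []
  | b :: t => pvGroupBy b 1 t

-- max over the lengths of the True runs, default 0
def pvMaxTrue (acc : Int) (l : List (Bool × Int)) : Int :=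
  List.foldl (fun a (p : Bool × Int) => if p.1 then max a p.2 else a) acc l

def word_combo_score_alt (target_words : List String) (typed_words : List String) : Int :=
  pvMaxTrue 0 (pvRuns ((List.zip target_words typed_words).map (fun p => p.1 == p.2)))

-- ===== PRECONDITION & SPEC =====
def Spec_word_combo_score (target_words : List String) (typed_words : List String) (out : Int) : Prop := out = word_combo_score_alt target_words typed_words
instance (target_words : List String) (typed_words : List String) (out : Int) : Decidable (Spec_word_combo_score target_words typed_words out) := by unfold Spec_word_combo_score; infer_instance

-- ===== CLAIM (what is proved, stated in full; the proofs are below) =====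
def Claim_equal_word_combo_score : Prop := ∀ (target_words : List String) (typed_words : List String), Dom_word_combo_score target_words typed_words → Spec_word_combo_score target_words typed_words (word_combo_score target_words typed_words)

-- ===== LEMMAS AND PROOFS =====

def pvStep (st : Int × Int) (m : Bool) : Int × Int :=
  if m then (max st.1 (st.2 + 1), st.2 + 1) else (st.1, 0)

theorem pvKey : ∀ (t : List Bool) (b : Bool) (n acc : Int), 1 ≤ n → 0 ≤ acc →
    (List.foldl pvStep (max acc (if b then n else 0), if b then n else 0) t).1
      = pvMaxTrue acc (pvGroupBy b n t) := by
  intro t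
  induction t with
  | nil =>
    intro b n acc hn ha
    cases b <;> simp [pvGroupBy, pvMaxTrue, List.foldl] <;> omega
  | cons c t ih =>
    intro b n acc hn ha
    simp only [pvGroupBy]
    by_cases hcb : c = b
    · subst hcb
      cases c with
      | true =>
        simp only [List.foldl, pvStep, beq_self_eq_true, if_pos]
        have h1 : max (max acc n) (n + 1) = max acc (n + 1) := by omega
        have := ih true (n + 1) acc (by omega) ha
        simp only [] at this ⊢
        rw [h1]; exact this
      | false =>
        simp only [List.foldl, pvStep, beq_self_eq_true, if_pos]
        have := ih false (n + 1) acc (by omega) ha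
        simpa using this
    · have hne : (c == b) = false := by cases c <;> cases b <;> simp_all
      simp only [hne, if_neg Bool.false_ne_true]
      cases b with
      | true =>
        have hc : c = false := by cases c <;> simp_all
        subst hc
        have := ih false 1 (max acc n) (le_refl 1) (by omega)
        simp only [if_neg Bool.false_ne_true] at this
        have h0 : max (max acc n) 0 = max acc n := by omega
        rw [h0] at this
        simp only [pvMaxTrue, List.foldl, pvStep, if_pos trivial] at this ⊢
        exact this
      | false =>
        have hc : c = true := by cases c <;> simp_all
        subst hc
        have := ih true 1 acc (le_refl 1) ha
        have h0 : max (max acc 0) (0 + 1) = max acc 1 := by omega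
        simp only [if_pos trivial, if_neg Bool.false_ne_true] at this ⊢
        simp only [pvMaxTrue, List.foldl, pvStep, if_pos trivial, if_neg Bool.false_ne_true] at this ⊢
        rw [h0]
        exact this

theorem pvFoldMatches : ∀ (ms : List Bool),
    (List.foldl pvStep (0, 0) ms).1 = pvMaxTrue 0 (pvRuns ms) := by
  intro ms
  cases ms with
  | nil => simp [pvRuns, pvMaxTrue, List.foldl]
  | cons b t =>
    simp only [pvRuns, List.foldl]
    have := pvKey t b 1 0 (le_refl 1) (le_refl 0)
    cases b with
    | true =>
      simp only [] at this
      simpa [pvStep] using this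
    | false =>
      simp only [if_neg Bool.false_ne_true] at this
      simpa [pvStep] using this

-- ===== VERDICT (by name: the statement is the Claim_ definition above) =====
theorem word_combo_score_spec : Claim_equal_word_combo_score := by
  intro target_words typed_words _
  unfold Spec_word_combo_score word_combo_score word_combo_score_alt
  rw [← pvFoldMatches, List.foldl_map]
  rfl
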